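-- pv_equiv track=rewrite | github.com/tjwldnjss13/ADS-PNU | Suffix Tree/suffix_array.py | str_compare
-- ===== SOURCE A (Python) =====
-- def str_compare(str1, str2):
--     len1, len2 = len(str1), len(str2)
--     length = 0
--
--     if len1 < len2:
--         length = len1
--     else:
--         length = len2
--
--     for i in range(length):
--         if str1[i] < str2[i]:
--             return 2
--         elif str1[i] > str2[i]:
--             return 1
--         else:
--             continue
--
--     return 0
-- ===== SOURCE B (Python) =====
-- def str_compare(str1, str2):
--     n = min(len(str1), len(str2))
--     a, b = str1[:n], str2[:n]
--     if a == b: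
--         return 0
--     return 1 if a > b else 2
-- ===== Notes on version B (the rewrite author's own statement) =====
-- stated objective: simpler
-- what changed: Replaces the explicit indexed character-by-character loop with slicing both strings to their common length and one built-in lexicographic comparison of the slices, keeping the quirk that an equal common prefix yields 0.
import Mathlib
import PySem

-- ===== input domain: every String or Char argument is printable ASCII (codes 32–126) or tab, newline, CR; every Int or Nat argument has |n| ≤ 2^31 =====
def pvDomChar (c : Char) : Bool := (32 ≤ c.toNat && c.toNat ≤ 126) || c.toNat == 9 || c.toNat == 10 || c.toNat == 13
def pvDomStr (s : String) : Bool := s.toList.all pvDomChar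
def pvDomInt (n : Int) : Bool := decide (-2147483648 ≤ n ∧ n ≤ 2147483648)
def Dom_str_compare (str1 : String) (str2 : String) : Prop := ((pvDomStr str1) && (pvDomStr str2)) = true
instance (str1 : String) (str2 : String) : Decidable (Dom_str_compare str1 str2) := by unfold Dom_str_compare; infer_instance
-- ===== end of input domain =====

-- B replaces A's indexed character loop by slicing both strings to their common
-- length and comparing the slices with the built-in lexicographic comparison (objective: simpler).


-- ===== PORT A =====
-- the 'for i in range(length)' loop with its two early returns
def strCompareLoop (l1 l2 : List Char) (length : Nat) (i : Nat) : Int :=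
  if i < length then
    -- str1[i] < str2[i] / str1[i] > str2[i]; in A the index is always in range
    if l1.getD i ' ' < l2.getD i ' ' then 2
    else if l1.getD i ' ' > l2.getD i ' ' then 1
    else strCompareLoop l1 l2 length (i + 1)
  else 0
termination_by length - i

def str_compare (str1 : String) (str2 : String) : Int :=
  strCompareLoop str1.toList str2.toList
    (if str1.toList.length < str2.toList.length then str1.toList.length else str2.toList.length) 0

-- ===== PORT B =====
def str_compare_alt (str1 : String) (str2 : String) : Int :=
  if str1.toList.take (min str1.toList.length str2.toList.length)
      = str2.toList.take (min str1.toList.length str2.toList.length) then 0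
  else if str2.toList.take (min str1.toList.length str2.toList.length)
      < str1.toList.take (min str1.toList.length str2.toList.length) then 1 else 2

-- ===== PRECONDITION & SPEC =====
def Spec_str_compare (str1 : String) (str2 : String) (out : Int) : Prop := out = str_compare_alt str1 str2
instance (str1 : String) (str2 : String) (out : Int) : Decidable (Spec_str_compare str1 str2 out) := by unfold Spec_str_compare; infer_instance

-- ===== CLAIM (what is proved, stated in full; the proofs are below) =====
def Claim_equal_str_compare : Prop := ∀ (str1 : String) (str2 : String), Dom_str_compare str1 str2 → Spec_str_compare str1 str2 (str_compare str1 str2)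

-- ===== LEMMAS AND PROOFS =====
lemma strCompareLoop_eq (l1 l2 : List Char) (length : Nat)
    (h1 : length ≤ l1.length) (h2 : length ≤ l2.length) :
    ∀ i, strCompareLoop l1 l2 length i =
      (if (l1.drop i).take (length - i) = (l2.drop i).take (length - i) then 0
       else if (l2.drop i).take (length - i) < (l1.drop i).take (length - i) then (1 : Int) else 2) := by
  intro i
  induction hk : length - i using Nat.strong_induction_on generalizing i with
  | _ k ih =>
    subst hk
    rw [strCompareLoop]
    by_cases hi : i < length
    · have hi1 : i < l1.length := lt_of_lt_of_le hi h1
      have hi2 : i < l2.length := lt_of_lt_of_le hi h2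
      have hd1 : l1.drop i = l1[i] :: l1.drop (i + 1) := List.drop_eq_getElem_cons hi1
      have hd2 : l2.drop i = l2[i] :: l2.drop (i + 1) := List.drop_eq_getElem_cons hi2
      have hlen : length - i = (length - (i + 1)) + 1 := by omega
      rw [if_pos hi, List.getD_eq_getElem l1 ' ' hi1, List.getD_eq_getElem l2 ' ' hi2,
        hd1, hd2, hlen, List.take_succ_cons, List.take_succ_cons]
      by_cases hlt : l1[i] < l2[i]
      · rw [if_pos hlt]
        have hne : l1[i] :: (l1.drop (i+1)).take (length - (i+1)) ≠
            l2[i] :: (l2.drop (i+1)).take (length - (i+1)) := by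
          simp only [ne_eq, List.cons.injEq, not_and]
          intro h; exact absurd h (ne_of_lt hlt)
        rw [if_neg hne, if_neg]
        rw [List.cons_lt_cons_iff]
        push Not
        exact ⟨le_of_lt hlt, fun h => absurd h.symm (ne_of_lt hlt)⟩
      · rw [if_neg hlt]
        by_cases hgt : l1[i] > l2[i]
        · rw [if_pos hgt]
          have hne : l1[i] :: (l1.drop (i+1)).take (length - (i+1)) ≠
              l2[i] :: (l2.drop (i+1)).take (length - (i+1)) := by
            simp only [ne_eq, List.cons.injEq, not_and]
            intro h; exact absurd h (ne_of_gt hgt)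
          rw [if_neg hne, if_pos]
          rw [List.cons_lt_cons_iff]
          exact Or.inl hgt
        · rw [if_neg hgt]
          have heq : l1[i] = l2[i] := le_antisymm (not_lt.mp hgt) (not_lt.mp hlt)
          rw [ih (length - (i + 1)) (by omega) (i + 1) rfl, heq]
          have hcons : ∀ (x y : List Char),
              (l2[i] :: x = l2[i] :: y) ↔ x = y := by simp
          have hconsLt : ∀ (x y : List Char),
              (l2[i] :: x < l2[i] :: y) ↔ x < y := by
            intro x y; rw [List.cons_lt_cons_iff]; simp
          simp only [hcons, hconsLt]
    · have h0 : length - i = 0 := by omega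
      rw [if_neg hi, h0]
      simp

-- ===== VERDICT (by name: the statement is the Claim_ definition above) =====
theorem str_compare_spec : Claim_equal_str_compare := by
  intro str1 str2 _
  unfold Spec_str_compare str_compare str_compare_alt
  have hmin : (if str1.toList.length < str2.toList.length then str1.toList.length else str2.toList.length)
      = min str1.toList.length str2.toList.length := by
    split <;> omega
  rw [hmin, strCompareLoop_eq _ _ _ (Nat.min_le_left _ _) (Nat.min_le_right _ _) 0]
  simp
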